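-- pv_equiv track=rewrite | github.com/kobi1986/first_rep | story_parser.py | _split_into_epics
-- ===== SOURCE A (Python) =====
-- from typing import List, Dict, Optional
--
-- def _split_into_epics(content: str) -> List[str]:
--     """Split content into epic sections."""
--     lines = content.strip().split('\n')
--     sections = []
--     current_section = []
--
--     for line in lines:
--         line = line.strip()
--
--         # Skip empty lines and comments
--         if not line or line.startswith('#'):
--             continue
--
--         if line.startswith('EPIC:'):
--             # Start a new epic section
--             if current_section:
--                 sections.append('\n'.join(current_section))
--             current_section = [line]
--         else:
--             current_section.append(line)
--
--     # Add the last section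
--     if current_section:
--         sections.append('\n'.join(current_section))
--
--     return sections
-- ===== SOURCE B (Python) =====
-- from typing import List
--
-- def _split_into_epics(content: str) -> List[str]:
--     """Split content into epic sections (index/slice decomposition)."""
--     cleaned = [s for s in (l.strip() for l in content.strip().split('\n'))
--                if s and not s.startswith('#')]
--     idx = [i for i, l in enumerate(cleaned) if l.startswith('EPIC:')]
--     if not idx:
--         segments = [cleaned] if cleaned else []
--     else:
--         segments = [cleaned[0:idx[0]]] if idx[0] > 0 else []
--         segments += [cleaned[a:b] for a, b in zip(idx, idx[1:] + [len(cleaned)])]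
--     return ['\n'.join(seg) for seg in segments]
-- ===== Notes on version B (the rewrite author's own statement) =====
-- stated objective: alternative
-- what changed: B drops A's sections/current_section accumulator loop: it cleans the lines once, collects the EPIC-marker indices with enumerate, and builds each section by slicing between consecutive marker positions (leading slice kept iff non-empty), joining each slice.
import Mathlib
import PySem

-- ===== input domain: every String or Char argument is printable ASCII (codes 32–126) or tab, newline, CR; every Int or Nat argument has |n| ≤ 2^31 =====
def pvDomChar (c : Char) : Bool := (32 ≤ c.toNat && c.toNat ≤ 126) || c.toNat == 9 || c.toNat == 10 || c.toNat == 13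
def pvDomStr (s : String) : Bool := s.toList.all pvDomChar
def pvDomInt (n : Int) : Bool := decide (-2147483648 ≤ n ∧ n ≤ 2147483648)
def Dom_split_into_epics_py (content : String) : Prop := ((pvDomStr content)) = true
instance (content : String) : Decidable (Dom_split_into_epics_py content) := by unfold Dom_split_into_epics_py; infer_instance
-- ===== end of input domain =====

-- B replaces A's accumulator loop by a clean-lines pass, a marker-index pass and slicing (alternative decomposition, same cost).

-- ===== PORT A =====
def split_into_epics_py (content : String) : List String :=
  let lines := (PySem.Str.split? (PySem.Str.strip content) "\n").getD []
  let res := lines.foldl (fun (st : List String × List String) line =>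
      let line := PySem.Str.strip line
      if PySem.Str.len line == 0 || PySem.Str.startswith line "#" then st
      else if PySem.Str.startswith line "EPIC:" then
        (st.1 ++ (if st.2.isEmpty then [] else [PySem.Str.join "\n" st.2]), [line])
      else (st.1, st.2 ++ [line])) ([], [])
  res.1 ++ (if res.2.isEmpty then [] else [PySem.Str.join "\n" res.2])

-- ===== PORT B =====
def split_into_epics_py_alt (content : String) : List String :=
  let cleaned := (((PySem.Str.split? (PySem.Str.strip content) "\n").getD []).map PySem.Str.strip).filter
      (fun s => !(PySem.Str.len s == 0) && !(PySem.Str.startswith s "#"))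
  let idx := (PySem.List.enumerate cleaned).filterMap
      (fun p => if PySem.Str.startswith p.2 "EPIC:" then some p.1 else none)
  let segments :=
    match idx with
    | [] => if cleaned.isEmpty then [] else [cleaned]
    | k :: _ =>
      (if 0 < k then [PySem.List.slice cleaned (some 0) (some k)] else []) ++
      (List.zip idx (idx.drop 1 ++ [PySem.List.len cleaned])).map
        (fun (b : Int × Int) => PySem.List.slice cleaned (some b.1) (some b.2))
  segments.map (PySem.Str.join "\n")

-- ===== PRECONDITION & SPEC =====
def Spec_split_into_epics_py (content : String) (out : List String) : Prop := out = split_into_epics_py_alt content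
instance (content : String) (out : List String) : Decidable (Spec_split_into_epics_py content out) := by unfold Spec_split_into_epics_py; infer_instance

-- ===== CLAIM (what is proved, stated in full; the proofs are below) =====
def Claim_equal_split_into_epics_py : Prop := ∀ (content : String), Dom_split_into_epics_py content → Spec_split_into_epics_py content (split_into_epics_py content)

-- ===== LEMMAS AND PROOFS =====

-- proof-side abbreviations
def pvMarker (l : String) : Bool := PySem.Str.startswith l "EPIC:"

def pvFlush (c : List String) : List String :=
  if c.isEmpty then [] else [PySem.Str.join "\n" c]

-- the section recursion both programs are reduced to
def pvSegs (cur : List String) : List String → List (List String)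
  | [] => if cur.isEmpty then [] else [cur]
  | l :: ls =>
    if pvMarker l then (if cur.isEmpty then [] else [cur]) ++ pvSegs [l] ls
    else pvSegs (cur ++ [l]) ls

-- marker positions (Nat form of B's enumerate/filter pass)
def pvMidx : List String → List Nat
  | [] => []
  | x :: xs => if pvMarker x then 0 :: (pvMidx xs).map (· + 1) else (pvMidx xs).map (· + 1)

-- Nat-index form of B's segment construction
def pvNatSegs (xs : List String) : List (List String) :=
  match pvMidx xs with
  | [] => if xs.isEmpty then [] else [xs]
  | k :: rest =>
    (if 0 < k then [xs.take k] else []) ++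
    (List.zip (k :: rest) (rest ++ [xs.length])).map (fun p => (xs.drop p.1).take (p.2 - p.1))

-- A's loop body, flushed at the end, is pvSegs joined.
lemma pv_foldl_core (ls : List String) : ∀ (sections cur : List String),
    (let r := ls.foldl (fun (st : List String × List String) l =>
        if pvMarker l then (st.1 ++ pvFlush st.2, [l]) else (st.1, st.2 ++ [l])) (sections, cur)
     ; r.1 ++ pvFlush r.2)
    = sections ++ (pvSegs cur ls).map (PySem.Str.join "\n") := by
  induction ls with
  | nil => intro sections cur; simp [pvSegs, pvFlush]; split <;> simp
  | cons l ls ih =>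
    intro sections cur
    simp only [List.foldl_cons, pvSegs]
    by_cases h : pvMarker l
    · simp only [h, if_pos]
      rw [ih]
      simp [pvFlush]
      split <;> simp
    · simp only [h, Bool.false_eq_true, if_false]
      rw [ih]

-- slices of a cons with shifted bounds are slices of the tail
lemma pv_shift (l1 l2 : List Nat) (x : String) (xs : List String) :
    (List.zip (l1.map (· + 1)) (l2.map (· + 1))).map
        (fun p => ((x :: xs).drop p.1).take (p.2 - p.1))
      = (List.zip l1 l2).map (fun p => (xs.drop p.1).take (p.2 - p.1)) := by
  rw [List.zip_map]
  simp [List.map_map, Function.comp]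

-- pvSegs characterised by marker positions and slices
lemma pv_segs_eq (xs : List String) : ∀ (cur : List String),
    pvSegs cur xs =
      match pvMidx xs with
      | [] => if (cur ++ xs).isEmpty then [] else [cur ++ xs]
      | k :: rest =>
        (if (cur ++ xs.take k).isEmpty then [] else [cur ++ xs.take k]) ++
        (List.zip (k :: rest) (rest ++ [xs.length])).map (fun p => (xs.drop p.1).take (p.2 - p.1)) := by
  induction xs with
  | nil => intro cur; simp [pvSegs, pvMidx]
  | cons x xs ih =>
    intro cur
    by_cases h : pvMarker x
    · simp only [pvSegs, h, if_pos, pvMidx]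
      rw [ih [x]]
      cases hm : pvMidx xs with
      | nil => simp [List.zip]
      | cons k rest =>
        simp only [List.map_cons, List.cons_append, List.zip_cons_cons, List.map_cons,
          List.take_zero, List.append_nil, List.drop_zero, List.take_cons, Nat.sub_zero]
        have h2 : List.map (fun x => x + 1) rest ++ [(x :: xs).length]
            = List.map (fun x => x + 1) (rest ++ [xs.length]) := by simp
        have h3 : ((k + 1) :: List.map (fun x => x + 1) rest)
            = List.map (fun x => x + 1) (k :: rest) := by simp
        rw [h2, h3, pv_shift (k :: rest) (rest ++ [xs.length]) x xs]
        simp [List.append_assoc]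
    · simp only [pvSegs, h, Bool.false_eq_true, if_false, pvMidx]
      rw [ih (cur ++ [x])]
      cases hm : pvMidx xs with
      | nil => simp
      | cons k rest =>
        simp only [List.map_cons, List.cons_append, List.zip_cons_cons]
        have h2 : List.map (fun x => x + 1) rest ++ [(x :: xs).length]
            = List.map (fun x => x + 1) (rest ++ [xs.length]) := by simp
        have h3 : ((k + 1) :: List.map (fun x => x + 1) rest)
            = List.map (fun x => x + 1) (k :: rest) := by simp
        rw [h2, h3, pv_shift (k :: rest) (rest ++ [xs.length]) x xs]
        simp [List.append_assoc]

lemma pv_natSegs_eq (xs : List String) : pvNatSegs xs = pvSegs [] xs := by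
  rw [pv_segs_eq xs []]
  unfold pvNatSegs
  cases hm : pvMidx xs with
  | nil => rfl
  | cons k rest =>
    have hxs : xs ≠ [] := by
      intro h; rw [h] at hm; simp [pvMidx] at hm
    by_cases hk : 0 < k
    · have : ¬ (([] : List String) ++ xs.take k).isEmpty = true := by
        simp [List.take_eq_nil_iff, hxs]; omega
      simp [show ¬ (k = 0 ∨ xs = []) by
        intro hc; rcases hc with hc | hc
        · omega
        · exact hxs hc]
      simp [hk]
    · have hk0 : k = 0 := by omega
      simp [hk, hk0]

-- B's enumerate/filter pass computes the Int cast of pvMidx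
lemma pv_midx_int (xs : List String) : ∀ (s : Int),
    (PySem.List.enumerate xs s).filterMap
        (fun p => if PySem.Str.startswith p.2 "EPIC:" then some p.1 else none)
      = (pvMidx xs).map (fun (k : Nat) => s + (k : Int)) := by
  induction xs with
  | nil => intro s; simp only [PySem.List.enumerate_nil, List.filterMap_nil, pvMidx, List.map_nil]
  | cons x xs ih =>
    intro s
    rw [PySem.List.enumerate_cons]
    by_cases h : pvMarker x
    all_goals simp [pvMarker] at h
    · simp only [List.filterMap_cons, pvMarker] at *
      simp only [h, if_pos, ih (s+1), pvMidx]
      simp [pvMarker, h, List.map_map, Function.comp_def, add_assoc]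
      intro a _; ring
    · simp only [List.filterMap_cons, pvMarker] at *
      simp only [h, Bool.false_eq_true, if_false, ih (s+1), pvMidx]
      simp [pvMarker, h, List.map_map, Function.comp_def, add_assoc]
      intro a _; ring

-- Int slices over cast indices are Nat drop/take
lemma pv_zip_cast (l1 l2 : List Nat) (cleaned : List String) :
    (List.zip (l1.map (fun (k : Nat) => (k : Int))) (l2.map (fun (k : Nat) => (k : Int)))).map
        (fun (b : Int × Int) => PySem.List.slice cleaned (some b.1) (some b.2))
      = (List.zip l1 l2).map (fun p => (cleaned.drop p.1).take (p.2 - p.1)) := by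
  rw [List.zip_map]
  rw [List.map_map]
  apply List.map_congr_left
  intro p _
  simp [PySem.List.slice_toNat cleaned (Int.ofNat_nonneg p.1) (Int.ofNat_nonneg p.2)]

-- B's match expression is the Nat-index segment construction
lemma pv_alt_eq_natSegs (cleaned : List String) :
    (match (PySem.List.enumerate cleaned).filterMap
        (fun p => if PySem.Str.startswith p.2 "EPIC:" then some p.1 else none) with
      | [] => if cleaned.isEmpty then [] else [cleaned]
      | k :: _ =>
        (if 0 < k then [PySem.List.slice cleaned (some 0) (some k)] else []) ++
        (List.zip ((PySem.List.enumerate cleaned).filterMap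
            (fun p => if PySem.Str.startswith p.2 "EPIC:" then some p.1 else none))
          (((PySem.List.enumerate cleaned).filterMap
            (fun p => if PySem.Str.startswith p.2 "EPIC:" then some p.1 else none)).drop 1
            ++ [PySem.List.len cleaned])).map
          (fun (b : Int × Int) => PySem.List.slice cleaned (some b.1) (some b.2)))
      = pvNatSegs cleaned := by
  have hidx : (PySem.List.enumerate cleaned).filterMap
      (fun p => if PySem.Str.startswith p.2 "EPIC:" then some p.1 else none)
      = (pvMidx cleaned).map (fun (k : Nat) => (k : Int)) := by
    rw [pv_midx_int cleaned 0]; simp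
  rw [hidx]
  unfold pvNatSegs
  cases hm : pvMidx cleaned with
  | nil => rfl
  | cons k rest =>
    simp only [List.map_cons, List.drop_succ_cons, List.drop_zero]
    have h2 : List.map (fun (k : Nat) => (k : Int)) rest ++ [PySem.List.len cleaned]
        = List.map (fun (k : Nat) => (k : Int)) (rest ++ [cleaned.length]) := by
      simp [PySem.List.len_eq]
    have h3 : ((k : Int) :: List.map (fun (k : Nat) => (k : Int)) rest)
        = List.map (fun (k : Nat) => (k : Int)) (k :: rest) := by simp
    rw [h2, h3, pv_zip_cast (k :: rest) (rest ++ [cleaned.length]) cleaned]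
    have hsl : PySem.List.slice cleaned (some 0) (some (k : Int)) = cleaned.take k := by
      rw [PySem.List.slice_toNat cleaned (by omega) (Int.ofNat_nonneg k)]
      simp
    rw [hsl]
    by_cases hk : 0 < k
    · simp [hk]
    · simp [hk, show ¬ ((0:Int) < (k:Int)) by exact_mod_cast hk]

-- ===== VERDICT (by name: the statement is the Claim_ definition above) =====
lemma pv_step_eq :
    (fun (st : List String × List String) line =>
      let line := PySem.Str.strip line
      if PySem.Str.len line == 0 || PySem.Str.startswith line "#" then st
      else if PySem.Str.startswith line "EPIC:" then
        (st.1 ++ (if st.2.isEmpty then [] else [PySem.Str.join "\n" st.2]), [line])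
      else (st.1, st.2 ++ [line]))
    = (fun (st : List String × List String) y =>
        if (fun s => !(PySem.Str.len s == 0) && !(PySem.Str.startswith s "#")) (PySem.Str.strip y)
        then (fun (st : List String × List String) l =>
          if pvMarker l then (st.1 ++ pvFlush st.2, [l]) else (st.1, st.2 ++ [l])) st (PySem.Str.strip y)
        else st) := by
  funext st y
  by_cases ha : PySem.Chars.strip y.toList = []
  · simp [pvMarker, pvFlush, ha]
  · by_cases hb : PySem.Chars.startswith (PySem.Chars.strip y.toList) ['#'] = true <;>
      simp [pvMarker, pvFlush, ha, hb]

-- ===== final assembly =====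
lemma pv_flush_raw (c : List String) :
    (if c.isEmpty then [] else [PySem.Str.join "\n" c]) = pvFlush c := rfl

lemma pv_A_eq (lines : List String) :
    (let res := lines.foldl (fun (st : List String × List String) line =>
        let line := PySem.Str.strip line
        if PySem.Str.len line == 0 || PySem.Str.startswith line "#" then st
        else if PySem.Str.startswith line "EPIC:" then
          (st.1 ++ (if st.2.isEmpty then [] else [PySem.Str.join "\n" st.2]), [line])
        else (st.1, st.2 ++ [line])) ([], [])
     res.1 ++ (if res.2.isEmpty then [] else [PySem.Str.join "\n" res.2]))
    = (pvSegs [] ((lines.map PySem.Str.strip).filter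
        (fun s => !(PySem.Str.len s == 0) && !(PySem.Str.startswith s "#")))).map
        (PySem.Str.join "\n") := by
  have h1 : lines.foldl (fun (st : List String × List String) line =>
        let line := PySem.Str.strip line
        if PySem.Str.len line == 0 || PySem.Str.startswith line "#" then st
        else if PySem.Str.startswith line "EPIC:" then
          (st.1 ++ (if st.2.isEmpty then [] else [PySem.Str.join "\n" st.2]), [line])
        else (st.1, st.2 ++ [line])) ([], [])
      = ((lines.map PySem.Str.strip).filter
          (fun s => !(PySem.Str.len s == 0) && !(PySem.Str.startswith s "#"))).foldl
          (fun (st : List String × List String) l =>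
            if pvMarker l then (st.1 ++ pvFlush st.2, [l]) else (st.1, st.2 ++ [l])) ([], []) := by
    rw [pv_step_eq, List.foldl_filter, List.foldl_map]
  show (lines.foldl _ ([], [])).1 ++ _ = _
  rw [h1, pv_flush_raw]
  have h2 := pv_foldl_core ((lines.map PySem.Str.strip).filter
      (fun s => !(PySem.Str.len s == 0) && !(PySem.Str.startswith s "#"))) [] []
  simp only [List.nil_append] at h2
  exact h2

theorem split_into_epics_py_spec : Claim_equal_split_into_epics_py := by
  intro content _
  unfold Spec_split_into_epics_py split_into_epics_py split_into_epics_py_alt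
  simp only []
  rw [pv_A_eq, pv_alt_eq_natSegs, pv_natSegs_eq]
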